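-- pv_equiv track=rewrite | github.com/KhoiBui16/28Tech_Code_Online | Python/Lesson code/Part_02_Number_Theory/Lesson22_LuyetTapVietHam.py | is_largest_last_digit
-- ===== SOURCE A (Python) =====
-- def is_largest_last_digit(n):
--     flag = n % 10
--     while(n != 0):
--         digit = n % 10
--         if digit > flag:
--             return 0
--         n //= 10
--     return 1
-- ===== SOURCE B (Python) =====
-- def is_largest_last_digit(n):
--     s = str(n)
--     return 1 if s[-1] == max(s) else 0
-- ===== Notes on version B (the rewrite author's own statement) =====
-- stated objective: alternative
-- what changed: A extracts digits arithmetically with % 10 and //= 10 in an early-return loop; B does no digit arithmetic at all: it renders n with str() and compares the last character with the maximum character of the string.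
-- outside the precondition, e.g. on is_largest_last_digit(-5): A returns 0, B returns 1; on is_largest_last_digit(-1): A does not finish within the time limit, B returns 1
import Mathlib
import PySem

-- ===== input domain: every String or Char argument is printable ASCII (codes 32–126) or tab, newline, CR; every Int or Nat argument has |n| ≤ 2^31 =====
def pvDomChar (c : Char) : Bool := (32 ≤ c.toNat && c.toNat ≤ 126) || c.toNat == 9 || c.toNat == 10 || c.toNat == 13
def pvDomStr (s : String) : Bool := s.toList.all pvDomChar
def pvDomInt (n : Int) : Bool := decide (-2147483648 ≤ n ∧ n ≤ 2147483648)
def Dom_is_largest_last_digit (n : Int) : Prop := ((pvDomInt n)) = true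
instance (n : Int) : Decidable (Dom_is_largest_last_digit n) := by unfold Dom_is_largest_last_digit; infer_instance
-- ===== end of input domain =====

-- B replaces A's %10//=10 early-return digit loop by a string rendering: str(n),
-- then compare the last character with the maximum character (objective: alternative).

-- ===== PORT A =====
-- A's while loop; the final 'else 0' branch is only a totality guard: for n < 0 the
-- Python loop stalls at n = -1 (n // 10 = -1) and never reaches 0, so n < 0 is outside Pre_.
def pvLoopA (flag n : Int) : Int :=
  if n = 0 then 1
  else if PySem.Int.mod n 10 > flag then 0
  else if h : 0 < n then pvLoopA flag (PySem.Int.floordiv n 10) else 0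
termination_by n.toNat
decreasing_by
  have hfd : PySem.Int.floordiv n 10 = ((n.toNat / 10 : Nat) : Int) := by
    rw [show n = ((n.toNat : Nat) : Int) from (Int.toNat_of_nonneg (le_of_lt h)).symm]
    exact_mod_cast PySem.Int.floordiv_natCast n.toNat 10
  rw [hfd]; simp only [Int.toNat_natCast]
  exact Nat.div_lt_self (by omega) (by norm_num)

def is_largest_last_digit (n : Int) : Int := pvLoopA (PySem.Int.mod n 10) n

-- ===== PORT B =====
-- s = str(n); return 1 if s[-1] == max(s) else 0.  str(n) is never empty, so Python's
-- s[-1] and max(s) always return a character; the port compares the two Option values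
-- (both are 'some' on every input), which is exact on the whole domain.
def is_largest_last_digit_alt (n : Int) : Int :=
  if PySem.List.pyGet? (PySem.Int.toStr n).toList (-1)
      = PySem.List.max? (PySem.Int.toStr n).toList (fun c => c) then 1 else 0

-- ===== PRECONDITION & SPEC =====
-- Pre_ excludes negative n, outside this digit predicate's natural domain: there A's
-- floor-division loop stalls at -1 and either diverges (when n % 10 == 9) or answers 0,
-- while B reads the '-'-signed decimal string; neither behaviour is specified, see cites.
def Pre_is_largest_last_digit (n : Int) : Prop := 0 ≤ n
instance (n : Int) : Decidable (Pre_is_largest_last_digit n) := by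
  unfold Pre_is_largest_last_digit; infer_instance
def pvWitness_is_largest_last_digit : Int := 5

def Spec_is_largest_last_digit (n : Int) (out : Int) : Prop := out = is_largest_last_digit_alt n
instance (n : Int) (out : Int) : Decidable (Spec_is_largest_last_digit n out) := by
  unfold Spec_is_largest_last_digit; infer_instance

-- ===== CLAIM (what is proved, stated in full; the proofs are below) =====
def Claim_equal_is_largest_last_digit : Prop := ∀ (n : Int), Dom_is_largest_last_digit n → Pre_is_largest_last_digit n → Spec_is_largest_last_digit n (is_largest_last_digit n)

-- ===== LEMMAS AND PROOFS =====

-- the decimal digits of m, most significant first (the order str() prints them)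
def pvDlist (m : Nat) : List Nat :=
  if h : m < 10 then [m] else pvDlist (m / 10) ++ [m % 10]
termination_by m
decreasing_by exact Nat.div_lt_self (by omega) (by norm_num)

theorem pvDlist_ne_nil (m : Nat) : pvDlist m ≠ [] := by
  rw [pvDlist]; split <;> simp

theorem pvDlist_lt (m : Nat) : ∀ d ∈ pvDlist m, d < 10 := by
  induction m using Nat.strong_induction_on with
  | _ m ih =>
    rw [pvDlist]
    split
    · next h => intro d hd; simp at hd; omega
    · next h =>
      intro d hd
      simp only [List.mem_append, List.mem_singleton] at hd
      rcases hd with hd | hd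
      · exact ih (m / 10) (Nat.div_lt_self (by omega) (by norm_num)) d hd
      · omega

theorem pvDlist_getLast? (m : Nat) : (pvDlist m).getLast? = some (m % 10) := by
  rw [pvDlist]
  split
  · next h => simp [Nat.mod_eq_of_lt h]
  · simp

theorem toDigitsCore_eq (f : Nat) : ∀ (n : Nat) (acc : List Char), n < f →
    Nat.toDigitsCore 10 f n acc = (pvDlist n).map Nat.digitChar ++ acc := by
  induction f with
  | zero => intro n acc h; omega
  | succ f ih =>
    intro n acc h
    show (if n / 10 = 0 then (n % 10).digitChar :: acc
          else Nat.toDigitsCore 10 f (n / 10) ((n % 10).digitChar :: acc))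
        = (pvDlist n).map Nat.digitChar ++ acc
    by_cases h10 : n < 10
    · rw [pvDlist]
      simp [Nat.div_eq_of_lt h10, Nat.mod_eq_of_lt h10, dif_pos h10]
    · have hq : ¬ (n / 10 = 0) := by omega
      rw [if_neg hq, ih (n / 10) _ (by
        have := Nat.div_lt_self (show 0 < n by omega) (show 1 < 10 by norm_num); omega)]
      conv_rhs => rw [pvDlist]
      simp [dif_neg h10]

theorem toChars_nonneg (n : Int) (h : 0 ≤ n) :
    PySem.Int.toChars n = (pvDlist n.toNat).map Nat.digitChar := by
  unfold PySem.Int.toChars Nat.toDigits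
  rw [if_neg (by omega)]
  simpa using toDigitsCore_eq (n.toNat + 1) n.toNat [] (by omega)

theorem digitChar_le_iff {a b : Nat} (ha : a < 10) (hb : b < 10) :
    (Nat.digitChar a ≤ Nat.digitChar b) ↔ a ≤ b := by
  interval_cases a <;> interval_cases b <;> simp <;> decide

-- A's loop returns 1 iff every digit of n (in any order) is ≤ flag, for 0 ≤ n, 0 ≤ flag
theorem pvLoopA_eq (flag : Int) (h0 : 0 ≤ flag) :
    ∀ (n : Int), 0 ≤ n →
    pvLoopA flag n = if ∀ d ∈ pvDlist n.toNat, (d : Int) ≤ flag then 1 else 0 := by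
  have hL0 : pvLoopA flag 0 = 1 := by rw [pvLoopA]; simp
  have h0l : pvDlist 0 = [0] := by rw [pvDlist]; norm_num
  have main : ∀ (m : Nat) (n : Int), 0 ≤ n → n.toNat = m →
      pvLoopA flag n = if ∀ d ∈ pvDlist n.toNat, (d : Int) ≤ flag then 1 else 0 := by
    intro m
    induction m using Nat.strong_induction_on with
    | _ m ih =>
      intro n hn hm
      by_cases hz : n = 0
      · subst hz
        rw [hL0, Int.toNat_zero, h0l, if_pos]
        intro d hd; simp at hd; omega
      · have hpos : 0 < n := lt_of_le_of_ne hn (Ne.symm hz)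
        have hme : PySem.Int.mod n 10 = n % 10 := PySem.Int.mod_eq_emod_of_pos (by norm_num)
        have hfe : PySem.Int.floordiv n 10 = n / 10 := PySem.Int.floordiv_eq_ediv_of_pos (by norm_num)
        have hmodc : n % 10 = ((n.toNat % 10 : Nat) : Int) := by omega
        have hdivc : n / 10 = ((n.toNat / 10 : Nat) : Int) := by omega
        rw [pvLoopA, if_neg hz, hme, hfe, dif_pos hpos]
        by_cases h10 : n.toNat < 10
        · have hd0 : n / 10 = 0 := by omega
          rw [hd0, hL0]
          conv_rhs => rw [pvDlist, dif_pos h10]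
          simp only [List.mem_singleton, forall_eq]
          by_cases hgt : n % 10 > flag
          · rw [if_pos hgt, if_neg (by omega)]
          · rw [if_neg hgt, if_pos (by omega)]
        · have hqlt : (n / 10).toNat < m := by omega
          have hqnn : 0 ≤ n / 10 := by omega
          have hrec := ih _ hqlt (n / 10) hqnn rfl
          have hqn : (n / 10).toNat = n.toNat / 10 := by omega
          rw [hqn] at hrec
          conv_rhs => rw [pvDlist, dif_neg h10]
          rw [hrec]
          simp only [List.forall_mem_append, List.forall_mem_singleton]
          by_cases hgt : n % 10 > flag
          · rw [if_pos hgt, if_neg]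
            rintro ⟨-, h2⟩
            omega
          · rw [if_neg hgt]
            by_cases hall : ∀ d ∈ pvDlist (n.toNat / 10), (d : Int) ≤ flag
            · rw [if_pos hall, if_pos ⟨hall, by omega⟩]
            · rw [if_neg hall, if_neg (fun h => hall h.1)]
  intro n hn; exact main n.toNat n hn rfl

-- B's string condition s[-1] == max(s) ⟺ every digit ≤ the last digit
theorem alt_char (n : Int) (hn : 0 ≤ n) :
    is_largest_last_digit_alt n
      = if ∀ d ∈ pvDlist n.toNat, (d : Int) ≤ ((n.toNat % 10 : Nat) : Int) then 1 else 0 := by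
  unfold is_largest_last_digit_alt
  rw [PySem.Int.toList_toStr, toChars_nonneg n hn]
  set m := n.toNat with hm
  set cs : List Char := (pvDlist m).map Nat.digitChar with hcs
  have hlast : cs.getLast? = some (Nat.digitChar (m % 10)) := by
    rw [hcs, List.getLast?_map, pvDlist_getLast? m]; rfl
  have hcond : (PySem.List.pyGet? cs (-1) = PySem.List.max? cs (fun c => c))
      ↔ (∀ c ∈ cs, c ≤ Nat.digitChar (m % 10)) := by
    rw [PySem.List.pyGet?_neg_one, hlast]
    constructor
    · intro heq c hc
      exact PySem.List.max?_isMax (key := fun c => c) heq.symm c hc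
    · intro hall
      have hne : cs ≠ [] := by
        rw [hcs]; simp [pvDlist_ne_nil m]
      obtain ⟨mx, hmx⟩ : ∃ mx, PySem.List.max? cs (fun c => c) = some mx := by
        rcases hx : PySem.List.max? cs (fun c : Char => c) with _ | mx
        · exact absurd ((PySem.List.max?_eq_none_iff cs _).mp hx) hne
        · exact ⟨mx, rfl⟩
      rw [hmx]
      have h1 : mx ≤ Nat.digitChar (m % 10) := hall mx (PySem.List.max?_mem hmx)
      have h2 : Nat.digitChar (m % 10) ≤ mx :=
        PySem.List.max?_isMax (key := fun c => c) hmx _ (List.mem_of_getLast? hlast)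
      have : Nat.digitChar (m % 10) = mx := le_antisymm h2 h1
      rw [this]
  simp only [hcond]
  have hdig : (∀ c ∈ cs, c ≤ Nat.digitChar (m % 10)) ↔ (∀ d ∈ pvDlist m, (d:Int) ≤ ((m % 10 : Nat) : Int)) := by
    rw [hcs]
    simp only [List.mem_map, forall_exists_index, and_imp]
    constructor
    · intro h d hd
      have := h (Nat.digitChar d) d hd rfl
      have hle := (digitChar_le_iff (pvDlist_lt m d hd) (Nat.mod_lt m (by norm_num))).mp this
      exact_mod_cast hle
    · intro h c d hd rfl
      have : d ≤ m % 10 := by have := h d hd; exact_mod_cast this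
      exact (digitChar_le_iff (pvDlist_lt m d hd) (Nat.mod_lt m (by norm_num))).mpr this
  by_cases hc : ∀ d ∈ pvDlist m, (d : Int) ≤ ((m % 10 : Nat) : Int)
  · rw [if_pos (hdig.mpr hc), if_pos hc]
  · rw [if_neg (fun h => hc (hdig.mp h)), if_neg hc]

-- ===== VERDICT (by name: the statement is the Claim_ definition above) =====
theorem is_largest_last_digit_spec : Claim_equal_is_largest_last_digit := by
  intro n _ hpre
  have hn : (0 : Int) ≤ n := hpre
  unfold Spec_is_largest_last_digit is_largest_last_digit
  rw [alt_char n hn]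
  have hflag : PySem.Int.mod n 10 = ((n.toNat % 10 : Nat) : Int) := by
    rw [PySem.Int.mod_eq_emod_of_pos (by norm_num : (0:Int) < 10)]; omega
  rw [hflag]
  exact pvLoopA_eq _ (by positivity) n hn
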